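-- pv_equiv track=rewrite | github.com/Craciun-Alexandru/research-assistant | pipeline/src/arxiv_digest/prefilter.py | apply_avoidance_filters
-- ===== SOURCE A (Python) =====
-- def apply_avoidance_filters(paper: dict, avoid_criteria: list[str]) -> bool:
--     """
--     Check if paper should be avoided based on criteria.
--
--     Returns:
--         True if paper should be KEPT, False if should be FILTERED OUT
--     """
--     title_lower = paper.get("title", "").lower()
--     abstract_lower = paper.get("abstract", "").lower()
--
--     for criterion in avoid_criteria:
--         criterion_lower = criterion.lower()
--
--         # Check for benchmark papers
--         if "benchmark" in criterion_lower or "empirical" in criterion_lower: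
--             benchmark_terms = ["benchmark", "evaluation", "comparison", "survey"]
--             has_benchmark = any(term in title_lower for term in benchmark_terms)
--
--             # Check if it has theoretical content
--             theory_terms = ["theorem", "proof", "theory", "theoretical", "analysis"]
--             has_theory = any(term in abstract_lower for term in theory_terms)
--
--             if has_benchmark and not has_theory:
--                 return False  # Filter out pure benchmark papers
--
--         # Check for engineering-only papers
--         if "engineering" in criterion_lower or "implementation" in criterion_lower:
--             engineering_terms = ["implementation", "system", "framework", "tool", "library"]
--             has_engineering = any(term in title_lower for term in engineering_terms)
--
--             theory_terms = ["theorem", "proof", "theory", "theoretical"]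
--             has_theory = any(term in abstract_lower for term in theory_terms)
--
--             if has_engineering and not has_theory:
--                 return False  # Filter out implementation-only papers
--
--     return True  # Keep the paper
-- ===== SOURCE B (Python) =====
-- def apply_avoidance_filters(paper: dict, avoid_criteria: list[str]) -> bool:
--     """Flag-based re-implementation: criterion scanning collapses to two existence
--     flags; paper predicates are evaluated once."""
--     title = paper.get("title", "").lower()
--     abstract = paper.get("abstract", "").lower()
--
--     flag_bench = False
--     flag_eng = False
--     for c in avoid_criteria:
--         cl = c.lower()
--         flag_bench = flag_bench or "benchmark" in cl or "empirical" in cl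
--         flag_eng = flag_eng or "engineering" in cl or "implementation" in cl
--
--     has_benchmark = any(t in title for t in ("benchmark", "evaluation", "comparison", "survey"))
--     theory_wide = any(t in abstract for t in ("theorem", "proof", "theory", "theoretical", "analysis"))
--     has_engineering = any(t in title for t in ("implementation", "system", "framework", "tool", "library"))
--     theory_narrow = any(t in abstract for t in ("theorem", "proof", "theory", "theoretical"))
--
--     return not ((flag_bench and has_benchmark and not theory_wide)
--                 or (flag_eng and has_engineering and not theory_narrow))
-- ===== Notes on version B (the rewrite author's own statement) =====
-- stated objective: simpler
-- what changed: The per-criterion loop with early returns is replaced by a single scan computing two existence flags plus one evaluation of the paper predicates (which do not depend on the criterion), combined in one boolean formula.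
import Mathlib
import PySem

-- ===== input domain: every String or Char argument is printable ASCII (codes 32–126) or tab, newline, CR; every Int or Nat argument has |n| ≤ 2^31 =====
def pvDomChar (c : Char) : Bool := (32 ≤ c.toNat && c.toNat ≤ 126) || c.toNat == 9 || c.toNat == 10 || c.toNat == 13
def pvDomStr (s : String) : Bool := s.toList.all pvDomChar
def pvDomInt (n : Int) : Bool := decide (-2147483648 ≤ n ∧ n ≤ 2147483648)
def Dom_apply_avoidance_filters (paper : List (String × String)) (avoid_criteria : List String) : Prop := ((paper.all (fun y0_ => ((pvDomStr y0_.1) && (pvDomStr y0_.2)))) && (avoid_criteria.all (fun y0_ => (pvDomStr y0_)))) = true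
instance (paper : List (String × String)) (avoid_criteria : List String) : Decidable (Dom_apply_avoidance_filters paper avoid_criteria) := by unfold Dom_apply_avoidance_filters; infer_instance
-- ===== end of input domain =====

-- B replaces A's per-criterion loop with early returns by two existence flags over the
-- criteria plus one evaluation of the (criterion-independent) paper predicates: simpler.

-- ===== PORT A =====
-- A's for-loop over avoid_criteria with its two early 'return False' branches,
-- as structural recursion; the nested 'if cond: ... if has_x and not has_theory: return False'
-- is flattened into one if-condition per block (same evaluation, same order).
def aafLoop (title_lower abstract_lower : String) : List String → Bool
  | [] => true
  | criterion :: rest =>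
    let criterion_lower := PySem.Str.lower criterion
    if (PySem.Str.isIn "benchmark" criterion_lower || PySem.Str.isIn "empirical" criterion_lower)
        && (["benchmark", "evaluation", "comparison", "survey"].any
              (fun term => PySem.Str.isIn term title_lower))
        && !(["theorem", "proof", "theory", "theoretical", "analysis"].any
              (fun term => PySem.Str.isIn term abstract_lower)) then
      false
    else if (PySem.Str.isIn "engineering" criterion_lower || PySem.Str.isIn "implementation" criterion_lower)
        && (["implementation", "system", "framework", "tool", "library"].any
              (fun term => PySem.Str.isIn term title_lower))
        && !(["theorem", "proof", "theory", "theoretical"].any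
              (fun term => PySem.Str.isIn term abstract_lower)) then
      false
    else
      aafLoop title_lower abstract_lower rest

def apply_avoidance_filters (paper : List (String × String)) (avoid_criteria : List String) : Bool :=
  let title_lower := PySem.Str.lower (PySem.Dict.getD ⟨paper⟩ "title" "")
  let abstract_lower := PySem.Str.lower (PySem.Dict.getD ⟨paper⟩ "abstract" "")
  aafLoop title_lower abstract_lower avoid_criteria

-- ===== PORT B =====
-- Source B's flag-accumulating loop body
def aafFlagStep (fs : Bool × Bool) (c : String) : Bool × Bool :=
  let cl := PySem.Str.lower c
  (fs.1 || PySem.Str.isIn "benchmark" cl || PySem.Str.isIn "empirical" cl,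
   fs.2 || PySem.Str.isIn "engineering" cl || PySem.Str.isIn "implementation" cl)

def apply_avoidance_filters_alt (paper : List (String × String)) (avoid_criteria : List String) : Bool :=
  let title := PySem.Str.lower (PySem.Dict.getD ⟨paper⟩ "title" "")
  let abstract := PySem.Str.lower (PySem.Dict.getD ⟨paper⟩ "abstract" "")
  let flags := avoid_criteria.foldl aafFlagStep (false, false)
  let has_benchmark := ["benchmark", "evaluation", "comparison", "survey"].any
      (fun t => PySem.Str.isIn t title)
  let theory_wide := ["theorem", "proof", "theory", "theoretical", "analysis"].any
      (fun t => PySem.Str.isIn t abstract)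
  let has_engineering := ["implementation", "system", "framework", "tool", "library"].any
      (fun t => PySem.Str.isIn t title)
  let theory_narrow := ["theorem", "proof", "theory", "theoretical"].any
      (fun t => PySem.Str.isIn t abstract)
  !((flags.1 && has_benchmark && !theory_wide) || (flags.2 && has_engineering && !theory_narrow))

-- ===== PRECONDITION & SPEC =====
def Spec_apply_avoidance_filters (paper : List (String × String)) (avoid_criteria : List String) (out : Bool) : Prop := out = apply_avoidance_filters_alt paper avoid_criteria
instance (paper : List (String × String)) (avoid_criteria : List String) (out : Bool) : Decidable (Spec_apply_avoidance_filters paper avoid_criteria out) := by unfold Spec_apply_avoidance_filters; infer_instance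

-- ===== CLAIM (what is proved, stated in full; the proofs are below) =====
def Claim_equal_apply_avoidance_filters : Prop := ∀ (paper : List (String × String)) (avoid_criteria : List String), Dom_apply_avoidance_filters paper avoid_criteria → Spec_apply_avoidance_filters paper avoid_criteria (apply_avoidance_filters paper avoid_criteria)

-- ===== LEMMAS AND PROOFS =====
-- the criterion predicates of both programs
def aafPB (c : String) : Bool :=
  PySem.Str.isIn "benchmark" (PySem.Str.lower c) || PySem.Str.isIn "empirical" (PySem.Str.lower c)
def aafPE (c : String) : Bool :=
  PySem.Str.isIn "engineering" (PySem.Str.lower c) || PySem.Str.isIn "implementation" (PySem.Str.lower c)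

lemma aafFlagStep_foldl (l : List String) (fb fe : Bool) :
    l.foldl aafFlagStep (fb, fe) = (fb || l.any aafPB, fe || l.any aafPE) := by
  induction l generalizing fb fe with
  | nil => simp
  | cons c rest ih =>
    simp only [List.foldl_cons, List.any_cons, aafFlagStep, ih, aafPB, aafPE]
    simp [Bool.or_assoc]

lemma aafLoop_eq (t a : String) (l : List String) :
    aafLoop t a l =
      !((l.any aafPB
          && (["benchmark", "evaluation", "comparison", "survey"].any (fun term => PySem.Str.isIn term t))
          && !(["theorem", "proof", "theory", "theoretical", "analysis"].any (fun term => PySem.Str.isIn term a)))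
        || (l.any aafPE
          && (["implementation", "system", "framework", "tool", "library"].any (fun term => PySem.Str.isIn term t))
          && !(["theorem", "proof", "theory", "theoretical"].any (fun term => PySem.Str.isIn term a)))) := by
  induction l with
  | nil => simp [aafLoop]
  | cons c rest ih =>
    dsimp only [aafLoop]
    rw [ih]
    generalize (["benchmark", "evaluation", "comparison", "survey"].any (fun term => PySem.Str.isIn term t)) = hB
    generalize (["implementation", "system", "framework", "tool", "library"].any (fun term => PySem.Str.isIn term t)) = hE
    generalize (["theorem", "proof", "theory", "theoretical", "analysis"].any (fun term => PySem.Str.isIn term a)) = tw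
    generalize (["theorem", "proof", "theory", "theoretical"].any (fun term => PySem.Str.isIn term a)) = tn
    simp only [List.any_cons, aafPB, aafPE]
    generalize PySem.Str.isIn "benchmark" (PySem.Str.lower c) = b1
    generalize PySem.Str.isIn "empirical" (PySem.Str.lower c) = b2
    generalize PySem.Str.isIn "engineering" (PySem.Str.lower c) = e1
    generalize PySem.Str.isIn "implementation" (PySem.Str.lower c) = e2
    generalize rest.any aafPB = rb
    generalize rest.any aafPE = re
    revert b1 b2 e1 e2 rb re hB hE tw tn
    decide

-- ===== VERDICT (by name: the statement is the Claim_ definition above) =====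
theorem apply_avoidance_filters_spec : Claim_equal_apply_avoidance_filters := by
  intro paper avoid_criteria _
  unfold Spec_apply_avoidance_filters apply_avoidance_filters apply_avoidance_filters_alt
  rw [aafLoop_eq, aafFlagStep_foldl]
  simp
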